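-- pv_equiv track=rewrite | github.com/kol9/Machine_Learning | CF labs/H.py | to_bits
-- ===== SOURCE A (Python) =====
-- def to_bits(x: int, l: int):
--     c = x
--     res = []
--     while c > 0:
--         d, m = divmod(c, 2)
--         res.append(m)
--         c = d
--
--     while len(res) < l:
--         res.append(0)
--     return res
-- ===== SOURCE B (Python) =====
-- def to_bits(x: int, l: int):
--     if x <= 0:
--         return [0] * max(l, 0)
--     n = max(l, x.bit_length())
--     return [(x >> i) & 1 for i in range(n)]
-- ===== Notes on version B (the rewrite author's own statement) =====
-- stated objective: simpler
-- what changed: Replaces A's unknown-length divmod accumulation loop plus a separate zero-padding loop by computing the output length n = max(l, x.bit_length()) up front and producing the list in one shift-and-mask comprehension over range(n); non-positive x yields the all-zero list directly (constant-factor win: one C-level comprehension with cheap shifts instead of two Python loops with divmod tuple unpacking and repeated appends).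
import Mathlib
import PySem

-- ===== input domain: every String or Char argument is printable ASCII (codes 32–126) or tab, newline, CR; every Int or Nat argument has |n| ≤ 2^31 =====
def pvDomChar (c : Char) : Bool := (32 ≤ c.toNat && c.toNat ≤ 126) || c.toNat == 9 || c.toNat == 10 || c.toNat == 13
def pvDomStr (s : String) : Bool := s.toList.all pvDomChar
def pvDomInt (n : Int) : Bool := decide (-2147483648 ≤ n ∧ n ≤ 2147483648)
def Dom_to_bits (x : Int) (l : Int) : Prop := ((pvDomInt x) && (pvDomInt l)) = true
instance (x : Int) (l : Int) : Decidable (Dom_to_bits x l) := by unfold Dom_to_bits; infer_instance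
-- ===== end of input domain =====

-- B computes the output length up front and builds the list in one shift-and-mask pass,
-- instead of A's divmod loop followed by a separate padding loop (objective: simpler).

-- ===== PORT A =====
-- first while loop: divmod accumulation while c > 0
def toBitsLoop (c : Int) : List Int :=
  if _h : 0 < c then
    PySem.Int.mod c 2 :: toBitsLoop (PySem.Int.floordiv c 2)
  else []
termination_by c.toNat
decreasing_by
  rw [PySem.Int.floordiv_eq_ediv_of_pos (by omega)]
  omega

-- second while loop: append 0 while len(res) < l
def padLoop (res : List Int) (l : Int) : List Int :=
  if (res.length : Int) < l then padLoop (res ++ [0]) l else res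
termination_by (l - res.length).toNat
decreasing_by
  simp only [List.length_append, List.length_cons, List.length_nil]
  omega

def to_bits (x : Int) (l : Int) : List Int :=
  padLoop (toBitsLoop x) l

-- ===== PORT B =====
def to_bits_alt (x : Int) (l : Int) : List Int :=
  if x ≤ 0 then
    List.replicate (max l 0).toNat 0
  else
    (PySem.List.pyRange 0 (max l (PySem.Int.bitLength x : Int)) 1).map
      (fun i => PySem.Int.band (x >>> i.toNat) 1)

-- ===== PRECONDITION & SPEC =====
def Spec_to_bits (x : Int) (l : Int) (out : List Int) : Prop := out = to_bits_alt x l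
instance (x : Int) (l : Int) (out : List Int) : Decidable (Spec_to_bits x l out) := by unfold Spec_to_bits; infer_instance

-- ===== CLAIM (what is proved, stated in full; the proofs are below) =====
def Claim_equal_to_bits : Prop := ∀ (x : Int) (l : Int), Dom_to_bits x l → Spec_to_bits x l (to_bits x l)

-- ===== LEMMAS AND PROOFS =====


lemma shiftRight_div (x : Int) (n : Nat) : x >>> n = x / 2 ^ n := by
  rw [Int.shiftRight_eq_div_pow]; push_cast; ring_nf

lemma padLoop_eq (res : List Int) (l : Int) :
    padLoop res l = res ++ List.replicate ((l - res.length).toNat) 0 := by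
  fun_induction padLoop with
  | case1 res h ih =>
    rw [ih]
    have h1 : ((l - res.length).toNat) = ((l - ((res ++ [0] : List Int)).length).toNat) + 1 := by
      simp only [List.length_append, List.length_cons, List.length_nil]
      omega
    rw [h1, List.replicate_succ, List.append_assoc]
    rfl
  | case2 res h =>
    have h1 : ((l - res.length).toNat) = 0 := by omega
    simp [h1]

lemma toBitsLoop_eq_aux : ∀ (n : Nat) (x : Int), x.toNat ≤ n → 0 < x →
    toBitsLoop x =
      (List.range (PySem.Int.bitLength x)).map (fun k : Nat => PySem.Int.band (x >>> k) 1) := by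
  intro n
  induction n with
  | zero => intro x hn hx; omega
  | succ n ih =>
    intro x hn hx
    rw [toBitsLoop, dif_pos hx, PySem.Int.bitLength_of_pos hx,
        List.range_succ_eq_map, List.map_cons, List.map_map]
    have hfd : PySem.Int.floordiv x 2 = x / 2 := PySem.Int.floordiv_eq_ediv_of_pos (by omega)
    congr 1
    · rw [← PySem.Int.band_one x]
      congr 1
      rw [shiftRight_div]; simp
    · by_cases h2 : 0 < PySem.Int.floordiv x 2
      · rw [ih _ (by rw [hfd]; omega) h2]
        apply List.map_congr_left
        intro k _
        simp only [Function.comp]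
        congr 1
        rw [shiftRight_div, shiftRight_div, hfd,
            Int.ediv_ediv_of_nonneg (by positivity), ← pow_succ']
      · have h0 : PySem.Int.floordiv x 2 = 0 := by rw [hfd] at h2 ⊢; omega
        rw [h0, toBitsLoop, dif_neg (by omega)]
        simp [PySem.Int.bitLength_zero]

lemma band_one_high (x : Int) (h : 0 < x) (k : Nat) (hk : PySem.Int.bitLength x ≤ k) :
    PySem.Int.band (x >>> k) 1 = 0 := by
  have hb := PySem.Int.lt_two_pow_bitLength x
  have h1 : x.natAbs < 2 ^ k := Nat.lt_of_lt_of_le hb (Nat.pow_le_pow_right (by omega) hk)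
  have hx : x < 2 ^ k := by
    calc x = (x.natAbs : Int) := by omega
    _ < ((2 ^ k : Nat) : Int) := by exact_mod_cast h1
    _ = 2 ^ k := by push_cast; ring
  rw [shiftRight_div, Int.ediv_eq_zero_of_lt (by omega) hx]
  decide

-- ===== VERDICT (by name: the statement is the Claim_ definition above) =====
theorem to_bits_spec : Claim_equal_to_bits := by
  intro x l _
  unfold Spec_to_bits to_bits to_bits_alt
  by_cases hx : x ≤ 0
  · rw [if_pos hx, toBitsLoop, dif_neg (by omega), padLoop_eq]
    simp only [List.length_nil, List.nil_append, Nat.cast_zero, Int.sub_zero]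
    congr 1
    omega
  · replace hx : 0 < x := by omega
    rw [if_neg (by omega), padLoop_eq, toBitsLoop_eq_aux x.toNat x le_rfl hx]
    set L := PySem.Int.bitLength x with hL
    set g : Nat → Int := fun k : Nat => PySem.Int.band (x >>> k) 1 with hg
    rw [PySem.List.pyRange_one]
    have hmap : ∀ (m : List Nat), (m.map (fun k : Nat => ((0:Int) + k))).map
        (fun i : Int => PySem.Int.band (x >>> (i.toNat : Int)) 1) = m.map g := by
      intro m
      rw [List.map_map]
      apply List.map_congr_left
      intro k _
      have h0 : ((0:Int) + (k:Int)).toNat = k := by omega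
      simp only [Function.comp, h0, Int.shiftRight_natCast_right, hg]
    rw [hmap]
    have hp : (max l (L:Int) - 0).toNat = L + (l - ((List.range L).map g).length).toNat := by
      simp only [List.length_map, List.length_range]
      omega
    rw [hp, List.range_add, List.map_append, List.map_map]
    congr 1
    have : ∀ k ∈ List.range ((l - ((List.range L).map g).length).toNat),
        (g ∘ (fun i => L + i)) k = 0 := by
      intro k _
      exact band_one_high x hx (L + k) (by omega)
    rw [List.map_congr_left this, List.map_const']
    simp
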